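-- pv_equiv track=rewrite | github.com/projectbtle/argXtract | svcxtract/core/function_evaluator.py | check_preexisting_block
-- ===== SOURCE A (Python) =====
-- def check_preexisting_block(function_block_start_addresses,
--                             address, boundary=10):
--     preexists = False
--     for existing_candidate_address in function_block_start_addresses:
--         lower_bound = existing_candidate_address - boundary
--         upper_bound = existing_candidate_address + boundary
--         if (address > lower_bound) and (address < upper_bound):
--             preexists = True
--     return preexists
-- ===== SOURCE B (Python) =====
-- def check_preexisting_block(function_block_start_addresses,
--                             address, boundary=10):
--     s = sorted(function_block_start_addresses)
--     # binary search: first index whose value is >= address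
--     lo, hi = 0, len(s)
--     while lo < hi:
--         mid = (lo + hi) // 2
--         if s[mid] < address:
--             lo = mid + 1
--         else:
--             hi = mid
--     # only the two nearest neighbours of address can lie within the boundary
--     if lo < len(s) and s[lo] - address < boundary:
--         return True
--     if lo > 0 and address - s[lo - 1] < boundary:
--         return True
--     return False
-- ===== Notes on version B (the rewrite author's own statement) =====
-- stated objective: alternative
-- what changed: Replaces the full flag-setting scan by sort-then-binary-search: after sorting, only the two neighbours of address's insertion point can lie within the boundary, so one O(log n) search over the sorted list decides the answer.
import Mathlib
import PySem

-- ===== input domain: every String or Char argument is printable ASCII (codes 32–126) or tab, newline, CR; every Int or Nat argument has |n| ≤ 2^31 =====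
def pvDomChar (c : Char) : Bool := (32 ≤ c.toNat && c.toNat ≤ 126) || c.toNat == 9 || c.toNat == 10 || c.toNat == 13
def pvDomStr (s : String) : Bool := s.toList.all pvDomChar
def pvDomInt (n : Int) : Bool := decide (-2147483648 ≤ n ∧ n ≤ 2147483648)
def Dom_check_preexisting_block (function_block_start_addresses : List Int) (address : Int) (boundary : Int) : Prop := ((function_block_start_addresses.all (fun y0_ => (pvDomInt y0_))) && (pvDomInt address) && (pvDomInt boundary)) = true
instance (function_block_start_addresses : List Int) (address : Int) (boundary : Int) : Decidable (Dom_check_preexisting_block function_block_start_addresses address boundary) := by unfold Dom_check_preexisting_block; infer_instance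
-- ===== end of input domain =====

-- B replaces A's full flag-setting scan by sort + binary search for address's insertion point,
-- checking only the two nearest neighbours (alternative algorithm; same return value).

-- ===== PORT A =====
def check_preexisting_block (function_block_start_addresses : List Int) (address : Int) (boundary : Int) : Bool :=
  function_block_start_addresses.foldl
    (fun preexists existing_candidate_address =>
      let lower_bound := existing_candidate_address - boundary
      let upper_bound := existing_candidate_address + boundary
      if address > lower_bound ∧ address < upper_bound then true else preexists)
    false

-- ===== PORT B =====
-- binary search loop of Source B: first index in [lo, hi) whose value is ≥ address.
-- s[mid] is ported as getD: mid < hi ≤ len s on every call, so the Python index never raises.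
def pvBsearch (s : List Int) (address : Int) (lo hi : Nat) : Nat :=
  if _h : lo < hi then
    let mid := (lo + hi) / 2
    if s.getD mid 0 < address then pvBsearch s address (mid + 1) hi
    else pvBsearch s address lo mid
  else lo
termination_by hi - lo
decreasing_by all_goals omega

def check_preexisting_block_alt (function_block_start_addresses : List Int) (address : Int) (boundary : Int) : Bool :=
  let s := PySem.List.sorted function_block_start_addresses (fun x => x) false
  let lo := pvBsearch s address 0 s.length
  if lo < s.length ∧ s.getD lo 0 - address < boundary then true
  else if 0 < lo ∧ address - s.getD (lo - 1) 0 < boundary then true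
  else false

-- ===== PRECONDITION & SPEC =====
def Spec_check_preexisting_block (function_block_start_addresses : List Int) (address : Int) (boundary : Int) (out : Bool) : Prop := out = check_preexisting_block_alt function_block_start_addresses address boundary
instance (function_block_start_addresses : List Int) (address : Int) (boundary : Int) (out : Bool) : Decidable (Spec_check_preexisting_block function_block_start_addresses address boundary out) := by unfold Spec_check_preexisting_block; infer_instance

-- ===== CLAIM (what is proved, stated in full; the proofs are below) =====
def Claim_equal_check_preexisting_block : Prop := ∀ (function_block_start_addresses : List Int) (address : Int) (boundary : Int), Dom_check_preexisting_block function_block_start_addresses address boundary → Spec_check_preexisting_block function_block_start_addresses address boundary (check_preexisting_block function_block_start_addresses address boundary)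

-- ===== LEMMAS AND PROOFS =====

-- A's flag fold equals an existence test.
lemma flagFold_eq_any (a b : Int) : ∀ (l : List Int) (init : Bool),
    l.foldl (fun pre x =>
      let lo := x - b
      let hi := x + b
      if a > lo ∧ a < hi then true else pre) init
    = (init || l.any (fun x => decide (x - b < a ∧ a < x + b))) := by
  intro l
  induction l with
  | nil => simp
  | cons x xs ih =>
    intro init
    simp only [List.foldl_cons, List.any_cons, ih]
    by_cases h : a > x - b ∧ a < x + b
    · simp [h.1, h.2]
    · simp [h]

-- the binary search splits a monotone list at address: everything before the
-- result is < address, everything from the result on is ≥ address.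
lemma pvBsearch_spec (s : List Int) (a : Int)
    (hmono : ∀ p q : Nat, p ≤ q → q < s.length → s.getD p 0 ≤ s.getD q 0) :
    ∀ (lo hi : Nat), lo ≤ hi → hi ≤ s.length →
    (∀ i, i < lo → s.getD i 0 < a) →
    (∀ i, hi ≤ i → i < s.length → a ≤ s.getD i 0) →
    lo ≤ pvBsearch s a lo hi ∧ pvBsearch s a lo hi ≤ hi ∧
    (∀ i, i < pvBsearch s a lo hi → s.getD i 0 < a) ∧
    (∀ i, pvBsearch s a lo hi ≤ i → i < s.length → a ≤ s.getD i 0) := by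
  intro lo hi
  induction hlt : hi - lo using Nat.strong_induction_on generalizing lo hi with
  | _ n ih =>
    intro hle hhi hbefore hafter
    unfold pvBsearch
    by_cases h : lo < hi
    · simp only [h, dif_pos]
      set mid := (lo + hi) / 2 with hmid
      have hm1 : lo ≤ mid := by omega
      have hm2 : mid < hi := by omega
      by_cases hc : s.getD mid 0 < a
      · rw [if_pos hc]
        have := ih (hi - (mid + 1)) (by omega) (mid + 1) hi rfl (by omega) hhi
          (fun i hi' => by
            have : s.getD i 0 ≤ s.getD mid 0 := hmono i mid (by omega) (by omega)
            omega)
          hafter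
        exact ⟨by omega, this.2.1, this.2.2.1, this.2.2.2⟩
      · rw [if_neg hc]
        have := ih (mid - lo) (by omega) lo mid rfl (by omega) (by omega)
          hbefore
          (fun i hmi hil => by
            have : s.getD mid 0 ≤ s.getD i 0 := hmono mid i hmi hil
            omega)
        exact ⟨this.1, by omega, this.2.2.1, this.2.2.2⟩
    · rw [dif_neg h]
      have : lo = hi := by omega
      subst this
      exact ⟨le_refl _, le_refl _, hbefore, hafter⟩

-- membership in terms of getD at an in-range index.
lemma mem_iff_getD (s : List Int) (x : Int) :
    x ∈ s ↔ ∃ i : Nat, i < s.length ∧ s.getD i 0 = x := by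
  constructor
  · intro hx
    obtain ⟨i, hi, hx⟩ := List.mem_iff_getElem.mp hx
    exact ⟨i, hi, by rw [List.getD_eq_getElem _ _ hi]; exact hx⟩
  · rintro ⟨i, hi, hx⟩
    rw [List.getD_eq_getElem _ _ hi] at hx
    exact hx ▸ List.getElem_mem hi

-- for a monotone list split at k by address, some element lies strictly within
-- the boundary iff one of the two neighbours of the split point does.
lemma neighbours_iff (s : List Int) (a b : Int) (k : Nat)
    (hmono : ∀ p q : Nat, p ≤ q → q < s.length → s.getD p 0 ≤ s.getD q 0)
    (hkhi : k ≤ s.length)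
    (hbefore : ∀ i, i < k → s.getD i 0 < a)
    (hafter : ∀ i, k ≤ i → i < s.length → a ≤ s.getD i 0) :
    ((k < s.length ∧ s.getD k 0 - a < b) ∨ (0 < k ∧ a - s.getD (k - 1) 0 < b))
      ↔ ∃ x ∈ s, x - b < a ∧ a < x + b := by
  constructor
  · rintro (⟨hkl, hub⟩ | ⟨hkpos, hlb⟩)
    · have h1 := hafter k (le_refl _) hkl
      exact ⟨s.getD k 0, (mem_iff_getD s _).mpr ⟨k, hkl, rfl⟩, by omega, by omega⟩
    · have hkl : k - 1 < s.length := by omega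
      have h1 := hbefore (k - 1) (by omega)
      exact ⟨s.getD (k - 1) 0, (mem_iff_getD s _).mpr ⟨k - 1, hkl, rfl⟩, by omega, by omega⟩
  · rintro ⟨x, hx, hx1, hx2⟩
    obtain ⟨i, hi, hix⟩ := (mem_iff_getD s x).mp hx
    by_cases hcase : i < k
    · -- x < a: the left neighbour s[k-1] is between x and a, so it is in range too
      have hxa : x < a := hix ▸ hbefore i hcase
      have hkpos : 0 < k := by omega
      have hnb : x ≤ s.getD (k - 1) 0 := hix ▸ hmono i (k - 1) (by omega) (by omega)
      have hnl : s.getD (k - 1) 0 < a := hbefore (k - 1) (by omega)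
      exact Or.inr ⟨hkpos, by omega⟩
    · -- x ≥ a: the right neighbour s[k] is between a and x, so it is in range too
      have hik : k ≤ i := by omega
      have hax : a ≤ x := hix ▸ hafter i hik hi
      have hkl : k < s.length := by omega
      have hnb : s.getD k 0 ≤ x := hix ▸ hmono k i hik hi
      exact Or.inl ⟨hkl, by omega⟩

-- ===== VERDICT (by name: the statement is the Claim_ definition above) =====
theorem check_preexisting_block_spec : Claim_equal_check_preexisting_block := by
  intro l a b _
  unfold Spec_check_preexisting_block check_preexisting_block
  rw [flagFold_eq_any]
  show _ = check_preexisting_block_alt l a b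
  unfold check_preexisting_block_alt
  set s := PySem.List.sorted l (fun x => x) false with hs
  have hmono : ∀ p q : Nat, p ≤ q → q < s.length → s.getD p 0 ≤ s.getD q 0 := by
    intro p q hpq hq
    have hp : p < s.length := lt_of_le_of_lt (by omega) hq
    rw [List.getD_eq_getElem _ _ hp, List.getD_eq_getElem _ _ hq]
    exact PySem.List.sorted_id_getElem_mono (xs := l) hpq hq
  obtain ⟨_, hkhi, hbefore, hafter⟩ :=
    pvBsearch_spec s a hmono 0 s.length (by omega) (le_refl _)
      (by omega) (fun i h1 h2 => by omega)
  show (false || l.any fun x => decide (x - b < a ∧ a < x + b))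
      = (if pvBsearch s a 0 s.length < s.length ∧ s.getD (pvBsearch s a 0 s.length) 0 - a < b then true
         else if 0 < pvBsearch s a 0 s.length ∧ a - s.getD (pvBsearch s a 0 s.length - 1) 0 < b then true else false)
  generalize hkk : pvBsearch s a 0 s.length = k at *
  have key := neighbours_iff s a b k hmono hkhi hbefore hafter
  have hmem : ∀ x, x ∈ l ↔ x ∈ s := fun x => (PySem.List.mem_sorted _ _ _ _).symm
  rw [Bool.eq_iff_iff]
  simp only [Bool.false_or, List.any_eq_true, decide_eq_true_eq]
  constructor
  · rintro ⟨x, hx, hx1, hx2⟩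
    have := key.mpr ⟨x, (hmem x).mp hx, hx1, hx2⟩
    rcases this with ⟨h1, h2⟩ | ⟨h1, h2⟩
    · rw [if_pos ⟨h1, h2⟩]
    · by_cases hfirst : k < s.length ∧ s.getD k 0 - a < b
      · rw [if_pos hfirst]
      · rw [if_neg hfirst, if_pos ⟨h1, h2⟩]
  · intro h
    by_cases h1 : k < s.length ∧ s.getD k 0 - a < b
    · obtain ⟨x, hx, hx1, hx2⟩ := key.mp (Or.inl h1)
      exact ⟨x, (hmem x).mpr hx, hx1, hx2⟩
    · rw [if_neg h1] at h
      by_cases h2 : 0 < k ∧ a - s.getD (k - 1) 0 < b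
      · obtain ⟨x, hx, hx1, hx2⟩ := key.mp (Or.inr h2)
        exact ⟨x, (hmem x).mpr hx, hx1, hx2⟩
      · rw [if_neg h2] at h
        exact absurd h (by simp)
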